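-- pv_equiv track=rewrite | github.com/AndyH0ng/ssu-datathon | paper_top_co_keywords.py | get_co_keywords
-- ===== SOURCE A (Python) =====
-- from collections import Counter
--
-- def get_co_keywords(docs, target):
--     counter = Counter()
--     for doc in docs:
--         if target in doc:
--             for kw in doc:
--                 if kw != target:
--                     counter[kw] += 1
--     return counter
-- ===== SOURCE B (Python) =====
-- from collections import Counter
--
-- def get_co_keywords(docs, target):
--     # flatten the docs that contain target, list distinct co-keywords in first
--     # occurrence order, then count each one by scanning the word list
--     words = [kw for doc in docs if target in doc for kw in doc]
--     order = []
--     for kw in words: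
--         if kw != target and kw not in order:
--             order.append(kw)
--     return Counter({kw: words.count(kw) for kw in order})
-- ===== Notes on version B (the rewrite author's own statement) =====
-- stated objective: alternative
-- what changed: Replaces A's single-pass incremental counter with a per-key counting scheme: flatten the relevant docs, build the ordered list of distinct co-keywords, and compute each key's value with a separate words.count(kw) scan.
import Mathlib
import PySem

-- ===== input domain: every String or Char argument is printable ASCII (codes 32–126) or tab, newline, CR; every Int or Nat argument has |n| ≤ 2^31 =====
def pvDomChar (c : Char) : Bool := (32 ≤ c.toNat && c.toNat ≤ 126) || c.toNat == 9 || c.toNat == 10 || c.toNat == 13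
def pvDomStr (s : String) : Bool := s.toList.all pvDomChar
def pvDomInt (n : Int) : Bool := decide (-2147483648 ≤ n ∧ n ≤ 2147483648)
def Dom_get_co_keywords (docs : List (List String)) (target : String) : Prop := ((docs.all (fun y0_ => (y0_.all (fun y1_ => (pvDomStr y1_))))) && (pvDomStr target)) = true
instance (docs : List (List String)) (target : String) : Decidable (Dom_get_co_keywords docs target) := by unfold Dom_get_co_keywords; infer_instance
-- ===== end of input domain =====

-- B replaces A's single-pass incremental counter with a per-distinct-key counting scheme:
-- flatten the relevant docs, list the distinct co-keywords in order, count each by a separate scan.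


-- ===== PORT A =====
-- for doc in docs: if target in doc: for kw in doc: if kw != target: counter[kw] += 1
def get_co_keywords (docs : List (List String)) (target : String) : List (String × Int) :=
  (docs.foldl
    (fun counter doc =>
      if doc.contains target then
        doc.foldl (fun c kw => if kw ≠ target then c.modify kw 0 (· + 1) else c) counter
      else counter)
    PySem.Dict.empty).items

-- ===== PORT B =====
-- words = flattened relevant docs; order = distinct co-keywords (first occurrence, target skipped);
-- result = {kw: words.count(kw) for kw in order}
def get_co_keywords_alt (docs : List (List String)) (target : String) : List (String × Int) :=
  let words := (docs.filter (fun doc => doc.contains target)).flatten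
  let order := words.foldl
    (fun s kw => if kw ≠ target ∧ ¬ s.contains kw then s ++ [kw] else s) ([] : List String)
  order.map (fun kw => (kw, (words.count kw : Int)))

-- ===== PRECONDITION & SPEC =====
def Spec_get_co_keywords (docs : List (List String)) (target : String) (out : List (String × Int)) : Prop := out = get_co_keywords_alt docs target
instance (docs : List (List String)) (target : String) (out : List (String × Int)) : Decidable (Spec_get_co_keywords docs target out) := by unfold Spec_get_co_keywords; infer_instance

-- ===== CLAIM (what is proved, stated in full; the proofs are below) =====
def Claim_equal_get_co_keywords : Prop := ∀ (docs : List (List String)) (target : String), Dom_get_co_keywords docs target → Spec_get_co_keywords docs target (get_co_keywords docs target)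

-- ===== LEMMAS AND PROOFS =====

-- a guarded fold is a fold over the filtered list
theorem foldl_if_filter {α β : Type} (p : α → Bool) (g : β → α → β) :
    ∀ (l : List α) (acc : β),
      l.foldl (fun d x => if p x then g d x else d) acc = (l.filter p).foldl g acc := by
  intro l
  induction l with
  | nil => intro acc; rfl
  | cons x xs ih =>
    intro acc
    by_cases h : p x = true
    · simp [h, ih]
    · simp [h, ih]

-- lookup at a key ≠ t is unchanged by erasing t
theorem get?_erase_of_ne {ν : Type} (d : PySem.Dict String ν) {x t : String} (h : x ≠ t) :
    (d.erase t).get? x = d.get? x := by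
  obtain ⟨l⟩ := d
  induction l with
  | nil => rfl
  | cons p ps ih =>
    simp only [PySem.Dict.erase, PySem.Dict.get?, List.filter_cons] at *
    by_cases hk : p.1 = t
    · have hbt : (p.1 == t) = true := by simp [hk]
      simp only [hbt, Bool.not_true, Bool.false_eq_true, if_false]
      have hbx : (p.1 == x) = false := by simp [hk, Ne.symm h]
      simpa [List.find?, hbx] using ih
    · have hbt : (p.1 == t) = false := by simp [hk]
      simp only [hbt, Bool.not_false, if_true]
      by_cases hx : p.1 = x
      · simp [List.find?, hx]
      · have hx' : (p.1 == x) = false := by simp [hx]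
        simpa [List.find?, hx'] using ih

theorem contains_erase_of_ne {ν : Type} (d : PySem.Dict String ν) {x t : String} (h : x ≠ t) :
    (d.erase t).contains x = d.contains x := by
  rw [PySem.Dict.contains_eq_isSome_get?, PySem.Dict.contains_eq_isSome_get?,
    get?_erase_of_ne d h]

theorem getD_erase_of_ne {ν : Type} (d : PySem.Dict String ν) (d0 : ν) {x t : String} (h : x ≠ t) :
    (d.erase t).getD x d0 = d.getD x d0 := by
  rw [PySem.Dict.getD_eq_get?_getD, PySem.Dict.getD_eq_get?_getD, get?_erase_of_ne d h]

-- erasing t commutes with inserting at a key ≠ t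
theorem erase_insert_of_ne {ν : Type} (d : PySem.Dict String ν) (v : ν) {x t : String} (h : x ≠ t) :
    (d.insert x v).erase t = (d.erase t).insert x v := by
  have hc : (d.erase t).contains x = d.contains x := contains_erase_of_ne d h
  by_cases hcx : d.contains x = true
  · have e1 : d.insert x v =
        PySem.Dict.mk (d.items.map (fun p => if p.1 == x then (x, v) else p)) := by
      simp only [PySem.Dict.insert, hcx, if_pos]
    have e2 : (d.erase t).insert x v =
        PySem.Dict.mk ((d.erase t).items.map (fun p => if p.1 == x then (x, v) else p)) := by
      simp only [PySem.Dict.insert, hc, hcx, if_pos]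
    rw [e1, e2]
    apply PySem.Dict.ext
    show (d.items.map _).filter _ = ((d.items.filter _).map _)
    rw [List.filter_map]
    congr 1
    apply List.filter_congr
    intro p _
    simp only [Function.comp]
    by_cases hp : p.1 = x
    · simp [hp]
    · simp [hp]
  · have hcx' : d.contains x = false := by simpa using hcx
    have e1 : d.insert x v = PySem.Dict.mk (d.items ++ [(x, v)]) := by
      simp only [PySem.Dict.insert, hcx', Bool.false_eq_true, if_false]
    have e2 : (d.erase t).insert x v = PySem.Dict.mk ((d.erase t).items ++ [(x, v)]) := by
      simp only [PySem.Dict.insert, hc, hcx', Bool.false_eq_true, if_false]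
    rw [e1, e2]
    apply PySem.Dict.ext
    show (d.items ++ [(x, v)]).filter _ = (d.items.filter _) ++ [(x, v)]
    rw [List.filter_append]
    congr 1
    simp [h]

-- erasing t absorbs an insert at t
theorem erase_insert_self {ν : Type} (d : PySem.Dict String ν) (v : ν) (t : String) :
    (d.insert t v).erase t = d.erase t := by
  by_cases hc : d.contains t = true
  · have e1 : d.insert t v =
        PySem.Dict.mk (d.items.map (fun p => if p.1 == t then (t, v) else p)) := by
      simp only [PySem.Dict.insert, hc, if_pos]
    rw [e1]
    apply PySem.Dict.ext
    show (d.items.map _).filter _ = d.items.filter _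
    rw [List.filter_map]
    have hf : List.filter ((fun (p : String × ν) => !p.1 == t) ∘
        (fun p => if p.1 == t then (t, v) else p)) d.items
        = List.filter (fun p => !p.1 == t) d.items := by
      apply List.filter_congr
      intro p _
      simp only [Function.comp]
      by_cases hp : p.1 = t
      · simp [hp]
      · simp [hp]
    rw [hf]
    calc (List.filter (fun p => !p.1 == t) d.items).map
            (fun p => if p.1 == t then (t, v) else p)
        = (List.filter (fun p => !p.1 == t) d.items).map id := by
          apply List.map_congr_left
          intro p hp
          have hpt : (p.1 == t) = false := by
            have := List.of_mem_filter hp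
            simpa using this
          simp [hpt]
      _ = List.filter (fun p => !p.1 == t) d.items := List.map_id _
  · have hc' : d.contains t = false := by simpa using hc
    have e1 : d.insert t v = PySem.Dict.mk (d.items ++ [(t, v)]) := by
      simp only [PySem.Dict.insert, hc', Bool.false_eq_true, if_false]
    rw [e1]
    apply PySem.Dict.ext
    show (d.items ++ [(t, v)]).filter _ = d.items.filter _
    rw [List.filter_append]
    simp

-- skip-increment from an erased dict = increment-all then erase
theorem foldl_skip_eq_erase_foldl (t : String) :
    ∀ (xs : List String) (d : PySem.Dict String Int),
      xs.foldl (fun c kw => if kw ≠ t then c.modify kw 0 (· + 1) else c) (d.erase t)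
        = (xs.foldl (fun c kw => c.modify kw 0 (· + 1)) d).erase t := by
  intro xs
  induction xs with
  | nil => intro d; rfl
  | cons y xs ih =>
    intro d
    show xs.foldl (fun c kw => if kw ≠ t then c.modify kw 0 (· + 1) else c)
          (if y ≠ t then (d.erase t).modify y 0 (· + 1) else d.erase t)
        = (xs.foldl (fun c kw => c.modify kw 0 (· + 1)) (d.modify y 0 (· + 1))).erase t
    by_cases h : y = t
    · subst h
      rw [if_neg (by simp),
        show d.erase y = ((d.modify y 0 (· + 1)).erase y) from (erase_insert_self d _ y).symm]
      exact ih _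
    · rw [if_pos h,
        show (d.erase t).modify y 0 (· + 1) = (d.modify y 0 (· + 1)).erase t from by
          unfold PySem.Dict.modify
          rw [getD_erase_of_ne d 0 h, erase_insert_of_ne d _ h]]
      exact ih _

-- B's guarded dedup fold = dedup fold over the filtered list
theorem seen_fold_eq (t : String) :
    ∀ (xs : List String) (s : List String),
      xs.foldl (fun s kw => if kw ≠ t ∧ ¬ s.contains kw then s ++ [kw] else s) s
        = (xs.filter (fun k => !(k == t))).foldl PySem.Set.add s := by
  intro xs
  induction xs with
  | nil => intro s; rfl
  | cons y xs ih =>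
    intro s
    by_cases h : y = t
    · subst h
      simp only [List.foldl_cons, List.filter_cons, beq_self_eq_true, Bool.not_true,
        Bool.false_eq_true, if_false, ne_eq, not_true_eq_false, false_and, if_neg,
        not_false_eq_true]
      exact ih s
    · have hb : (!(y == t)) = true := by simp [h]
      simp only [List.foldl_cons, List.filter_cons, hb, if_pos, List.foldl_cons]
      rw [ih]
      congr 1
      by_cases hm : s.contains y = true
      · simp [PySem.Set.add, hm, h]
      · have hm' : s.contains y = false := by simpa using hm
        simp [PySem.Set.add, hm', h]

-- filter commutes with Set.add
theorem filter_add (p : String → Bool) (s : List String) (y : String) :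
    (PySem.Set.add s y).filter p
      = if p y then PySem.Set.add (s.filter p) y else s.filter p := by
  simp only [PySem.Set.add_eq_ite]
  by_cases hp : p y = true
  · by_cases hm : y ∈ s
    · have hf : y ∈ s.filter p := List.mem_filter.mpr ⟨hm, hp⟩
      simp [hp, hm, hf]
    · have hf : y ∉ s.filter p := fun h => hm (List.mem_filter.mp h).1
      simp [hp, hm, hf, List.filter_append]
  · have hp' : p y = false := by simpa using hp
    by_cases hm : y ∈ s
    · simp [hp', hm]
    · simp [hp', hm, List.filter_append]

-- filter commutes with the dedup fold (hence with Set.ofList)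
theorem filter_foldl_add (p : String → Bool) :
    ∀ (xs : List String) (s : List String),
      (xs.foldl PySem.Set.add s).filter p = (xs.filter p).foldl PySem.Set.add (s.filter p) := by
  intro xs
  induction xs with
  | nil => intro s; rfl
  | cons y xs ih =>
    intro s
    simp only [List.foldl_cons]
    rw [ih, filter_add]
    by_cases hp : p y = true
    · simp [List.filter_cons, hp]
    · simp [List.filter_cons, hp]

-- ===== VERDICT (by name: the statement is the Claim_ definition above) =====
theorem get_co_keywords_spec : Claim_equal_get_co_keywords := by
  intro docs target _
  show get_co_keywords docs target = get_co_keywords_alt docs target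
  unfold get_co_keywords get_co_keywords_alt
  simp only []
  set words := (docs.filter (fun doc => doc.contains target)).flatten with hwords
  -- A's dict = (counter words).erase target
  have hA :
      docs.foldl
        (fun counter doc =>
          if doc.contains target then
            doc.foldl (fun c kw => if kw ≠ target then c.modify kw (0:Int) (· + 1) else c) counter
          else counter)
        (PySem.Dict.empty : PySem.Dict String Int)
      = (PySem.Dict.counter words).erase target := by
    calc
      docs.foldl
          (fun counter doc =>
            if doc.contains target then
              doc.foldl (fun c kw => if kw ≠ target then c.modify kw (0:Int) (· + 1) else c) counter
            else counter)
          (PySem.Dict.empty : PySem.Dict String Int)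
        = (docs.filter (fun doc => doc.contains target)).foldl
            (fun counter doc =>
              doc.foldl (fun c kw => if kw ≠ target then c.modify kw (0:Int) (· + 1) else c) counter)
            (PySem.Dict.empty : PySem.Dict String Int) :=
          foldl_if_filter (fun doc => doc.contains target) _ docs _
      _ = words.foldl
            (fun c kw => if kw ≠ target then c.modify kw (0:Int) (· + 1) else c)
            ((PySem.Dict.empty : PySem.Dict String Int).erase target) :=
          List.foldl_flatten.symm
      _ = (words.foldl (fun c kw => c.modify kw (0:Int) (· + 1))
            (PySem.Dict.empty : PySem.Dict String Int)).erase target :=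
          foldl_skip_eq_erase_foldl target _ _
      _ = (PySem.Dict.counter words).erase target := by rw [PySem.Dict.counter_eq_foldl]
  rw [hA]
  -- erase's items = filtered items; counter's items via items_counter
  show ((PySem.Dict.counter words).items.filter (fun p => !(p.1 == target)))
      = (words.foldl (fun s kw => if kw ≠ target ∧ ¬ s.contains kw then s ++ [kw] else s)
          ([] : List String)).map (fun kw => (kw, (words.count kw : Int)))
  rw [PySem.Dict.items_counter, seen_fold_eq]
  have hfm : ((PySem.Set.ofList words).map (fun k => (k, (words.count k : Int)))).filter
        (fun p => !(p.1 == target))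
      = ((PySem.Set.ofList words).filter (fun k => !(k == target))).map
          (fun k => (k, (words.count k : Int))) := by
    rw [List.filter_map]
    rfl
  rw [hfm, PySem.Set.ofList_eq_foldl, filter_foldl_add]
  rfl
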